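-- pv_equiv track=rewrite | github.com/colabbrave/exam08 | scripts/prompt_utils.py | generate_prompt_variations
-- ===== SOURCE A (Python) =====
-- from typing import List, Dict, Any, Optional, Tuple
--
-- def generate_prompt_variations(base_prompt: str,
--                              variation_type: str = "all",
--                              num_variations: int = 3) -> List[str]:
--     """
--     生成提示詞變體
--
--     Args:
--         base_prompt: 基礎提示詞
--         variation_type: 變體類型，可選值：'format', 'content', 'style', 'all'
--         num_variations: 要生成的變體數量
--
--     Returns:
--         提示詞變體列表
--     """
--     variations = []
--
--     # 確保至少返回一個變體
--     if num_variations < 1: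
--         num_variations = 1
--
--     # 生成格式變體
--     if variation_type in ['format', 'all']:
--         formats = [
--             "請使用Markdown格式輸出，包含清晰的標題層級。",
--             "請使用結構化格式，包含章節標題和項目符號。",
--             "請使用簡潔的段落格式，避免過多的標題層級。"
--         ]
--         variations.extend([f"{base_prompt}\n\n{fmt}" for fmt in formats[:num_variations]])
--
--     # 生成內容變體
--     if variation_type in ['content', 'all'] and len(variations) < num_variations:
--         contents = [
--             "請著重記錄會議中的決策和行動項目。",
--             "請詳細記錄討論過程和各方意見。",
--             "請重點記錄會議結論和後續步驟。"
--         ]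
--         variations.extend([f"{base_prompt}\n\n{cont}" for cont in contents[:num_variations-len(variations)]])
--
--     # 生成風格變體
--     if variation_type in ['style', 'all'] and len(variations) < num_variations:
--         styles = [
--             "請使用正式且專業的語言風格。",
--             "請使用簡潔明瞭的語言風格。",
--             "請使用親切且易於理解的語言風格。"
--         ]
--         variations.extend([f"{base_prompt}\n\n{style}" for style in styles[:num_variations-len(variations)]])
--
--     # 如果變體不足，使用基礎提示詞填充
--     while len(variations) < num_variations:
--         variations.append(base_prompt)
--
--     return variations[:num_variations]
-- ===== SOURCE B (Python) =====
-- # B: table lookup (variation_type -> suffix list) + one slice/comprehension + arithmetic pad,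
-- # replacing A's three guarded incremental branches and while-loop.
-- FORMATS = [
--     "請使用Markdown格式輸出，包含清晰的標題層級。",
--     "請使用結構化格式，包含章節標題和項目符號。",
--     "請使用簡潔的段落格式，避免過多的標題層級。",
-- ]
-- CONTENTS = [
--     "請著重記錄會議中的決策和行動項目。",
--     "請詳細記錄討論過程和各方意見。",
--     "請重點記錄會議結論和後續步驟。",
-- ]
-- STYLES = [
--     "請使用正式且專業的語言風格。",
--     "請使用簡潔明瞭的語言風格。",
--     "請使用親切且易於理解的語言風格。",
-- ]
--
-- def generate_prompt_variations(base_prompt: str,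
--                                variation_type: str = "all",
--                                num_variations: int = 3):
--     n = max(num_variations, 1)
--     table = {
--         "format": FORMATS,
--         "content": CONTENTS,
--         "style": STYLES,
--         "all": FORMATS + CONTENTS + STYLES,
--     }
--     suffixes = table.get(variation_type, [])
--     variations = [f"{base_prompt}\n\n{s}" for s in suffixes[:n]]
--     variations += [base_prompt] * (n - len(variations))
--     return variations
-- ===== Notes on version B (the rewrite author's own statement) =====
-- stated objective: simpler
-- what changed: Replaces A's three guarded incremental-extend branches plus a while-loop pad and a final slice with one table lookup (variation_type -> suffix list), a single slice+comprehension, and an arithmetic pad.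
import Mathlib
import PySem

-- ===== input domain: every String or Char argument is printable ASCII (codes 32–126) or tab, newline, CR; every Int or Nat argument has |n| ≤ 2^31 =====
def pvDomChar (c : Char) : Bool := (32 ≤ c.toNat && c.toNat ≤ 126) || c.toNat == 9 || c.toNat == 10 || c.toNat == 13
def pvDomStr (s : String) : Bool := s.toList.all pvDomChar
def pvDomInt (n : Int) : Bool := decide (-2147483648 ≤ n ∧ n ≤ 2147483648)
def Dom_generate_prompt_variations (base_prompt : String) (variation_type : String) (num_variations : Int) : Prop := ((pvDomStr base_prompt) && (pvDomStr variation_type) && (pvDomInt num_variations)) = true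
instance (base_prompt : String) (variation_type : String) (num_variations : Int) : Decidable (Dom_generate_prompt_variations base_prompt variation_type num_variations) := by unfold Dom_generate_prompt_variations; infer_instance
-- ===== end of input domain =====

-- B replaces A's three guarded incremental branches + while-pad + final slice by one
-- table lookup, a single slice/comprehension and an arithmetic pad (objective: simpler).


-- ===== PORT A =====
-- the `while len(variations) < num_variations: variations.append(base_prompt)` loop
def pvPadWhile (base : String) (n : Int) (vs : List String) : List String :=
  if (vs.length : Int) < n then pvPadWhile base n (vs ++ [base]) else vs
termination_by (n - vs.length).toNat
decreasing_by simp; omega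

def generate_prompt_variations (base_prompt : String) (variation_type : String) (num_variations : Int) : List String :=
  let variations : List String := []
  let num_variations := if num_variations < 1 then 1 else num_variations
  let variations :=
    if variation_type = "format" ∨ variation_type = "all" then
      let formats : List String :=
        ["請使用Markdown格式輸出，包含清晰的標題層級。",
         "請使用結構化格式，包含章節標題和項目符號。",
         "請使用簡潔的段落格式，避免過多的標題層級。"]
      variations ++ (PySem.List.slice formats none (some num_variations)).map
        (fun fmt => base_prompt ++ "\n\n" ++ fmt)
    else variations
  let variations :=
    if (variation_type = "content" ∨ variation_type = "all") ∧ (variations.length : Int) < num_variations then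
      let contents : List String :=
        ["請著重記錄會議中的決策和行動項目。",
         "請詳細記錄討論過程和各方意見。",
         "請重點記錄會議結論和後續步驟。"]
      variations ++ (PySem.List.slice contents none (some (num_variations - variations.length))).map
        (fun cont => base_prompt ++ "\n\n" ++ cont)
    else variations
  let variations :=
    if (variation_type = "style" ∨ variation_type = "all") ∧ (variations.length : Int) < num_variations then
      let styles : List String :=
        ["請使用正式且專業的語言風格。",
         "請使用簡潔明瞭的語言風格。",
         "請使用親切且易於理解的語言風格。"]
      variations ++ (PySem.List.slice styles none (some (num_variations - variations.length))).map
        (fun style => base_prompt ++ "\n\n" ++ style)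
    else variations
  let variations := pvPadWhile base_prompt num_variations variations
  PySem.List.slice variations none (some num_variations)

-- ===== PORT B =====
def pvFormats : List String :=
  ["請使用Markdown格式輸出，包含清晰的標題層級。",
   "請使用結構化格式，包含章節標題和項目符號。",
   "請使用簡潔的段落格式，避免過多的標題層級。"]
def pvContents : List String :=
  ["請著重記錄會議中的決策和行動項目。",
   "請詳細記錄討論過程和各方意見。",
   "請重點記錄會議結論和後續步驟。"]
def pvStyles : List String :=
  ["請使用正式且專業的語言風格。",
   "請使用簡潔明瞭的語言風格。",
   "請使用親切且易於理解的語言風格。"]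

def generate_prompt_variations_alt (base_prompt : String) (variation_type : String) (num_variations : Int) : List String :=
  let n := max num_variations 1
  let table : PySem.Dict String (List String) :=
    PySem.Dict.ofList
      [("format", pvFormats), ("content", pvContents), ("style", pvStyles),
       ("all", pvFormats ++ pvContents ++ pvStyles)]
  let suffixes := PySem.Dict.getD table variation_type []
  let variations := (PySem.List.slice suffixes none (some n)).map
    (fun s => base_prompt ++ "\n\n" ++ s)
  variations ++ List.replicate (n - (variations.length : Int)).toNat base_prompt

-- ===== PRECONDITION & SPEC =====
def Spec_generate_prompt_variations (base_prompt : String) (variation_type : String) (num_variations : Int) (out : List String) : Prop := out = generate_prompt_variations_alt base_prompt variation_type num_variations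
instance (base_prompt : String) (variation_type : String) (num_variations : Int) (out : List String) : Decidable (Spec_generate_prompt_variations base_prompt variation_type num_variations out) := by unfold Spec_generate_prompt_variations; infer_instance

-- ===== CLAIM (what is proved, stated in full; the proofs are below) =====
def Claim_equal_generate_prompt_variations : Prop := ∀ (base_prompt : String) (variation_type : String) (num_variations : Int), Dom_generate_prompt_variations base_prompt variation_type num_variations → Spec_generate_prompt_variations base_prompt variation_type num_variations (generate_prompt_variations base_prompt variation_type num_variations)

-- ===== LEMMAS AND PROOFS =====

theorem pvPadWhile_eq (base : String) (n : Int) (vs : List String) :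
    pvPadWhile base n vs = vs ++ List.replicate (n - vs.length).toNat base := by
  fun_induction pvPadWhile base n vs with
  | case1 vs h ih =>
      rw [ih]
      have h1 : (n - vs.length).toNat = (n - (vs ++ [base]).length).toNat + 1 := by
        simp; omega
      rw [h1, List.replicate_succ]
      simp
  | case2 vs h =>
      have : (n - vs.length).toNat = 0 := by omega
      simp [this]


theorem pvPadSlice (bp : String) (n : Int) (hn : 0 ≤ n) (M : List String) (hM : M.length ≤ n.toNat) :
    PySem.List.slice (pvPadWhile bp n M) none (some n)
      = M ++ List.replicate (n - M.length).toNat bp := by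
  rw [pvPadWhile_eq, PySem.List.slice_to _ hn]
  have h : (M ++ List.replicate (n - M.length).toNat bp).length = n.toNat := by
    simp; omega
  rw [← h, List.take_length]


theorem pvStep (f : String → String) (X Y : List String) (n : Int) (hn : 0 ≤ n) :
    (if (((X.take n.toNat).map f).length : Int) < n then
       ((X.take n.toNat).map f) ++ (PySem.List.slice Y none (some (n - ((X.take n.toNat).map f).length))).map f
     else ((X.take n.toNat).map f))
    = ((X ++ Y).take n.toNat).map f := by
  rw [List.take_append, List.map_append]
  by_cases h : ((((X.take n.toNat).map f).length : Int) < n)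
  · rw [if_pos h]
    rw [PySem.List.slice_to _ (by simp at h ⊢; omega)]
    congr 3
    simp at h ⊢
    omega
  · rw [if_neg h]
    have h0 : n.toNat - X.length = 0 := by simp at h; omega
    simp [h0]


theorem pvLookup_none (t : String) (h1 : t ≠ "format") (h2 : t ≠ "content")
    (h3 : t ≠ "style") (h4 : t ≠ "all") :
    PySem.Dict.getD (PySem.Dict.ofList
      [("format", pvFormats), ("content", pvContents), ("style", pvStyles),
       ("all", pvFormats ++ pvContents ++ pvStyles)]) t [] = [] := by
  have htab : (PySem.Dict.ofList
      [("format", pvFormats), ("content", pvContents), ("style", pvStyles),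
       ("all", pvFormats ++ pvContents ++ pvStyles)] : PySem.Dict String (List String))
      = PySem.Dict.mk [("format", pvFormats), ("content", pvContents), ("style", pvStyles),
       ("all", pvFormats ++ pvContents ++ pvStyles)] := by rfl
  rw [htab]
  simp only [PySem.Dict.getD, PySem.Dict.get?_mk_cons, beq_iff_eq]
  rw [if_neg (fun h => h1 h.symm), if_neg (fun h => h2 h.symm),
      if_neg (fun h => h3 h.symm), if_neg (fun h => h4 h.symm)]
  rfl


theorem pvMain (bp t : String) (n : Int) :
    generate_prompt_variations bp t n = generate_prompt_variations_alt bp t n := by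
  simp only [generate_prompt_variations, generate_prompt_variations_alt]
  have hmax : max n 1 = if n < 1 then 1 else n := by omega
  rw [hmax]
  set n' : Int := if n < 1 then 1 else n with hn'
  have hn0 : 0 ≤ n' := by rw [hn']; split <;> omega
  by_cases h1 : t = "format"
  · subst h1
    simp only [String.reduceEq, or_false, false_or, or_true, true_or, reduceIte,
      false_and, if_false, List.nil_append]
    rw [pvPadSlice bp n' hn0 _ (by rw [PySem.List.slice_to _ hn0]; simp)]
    rfl
  · by_cases h2 : t = "content"
    · subst h2
      simp only [String.reduceEq, or_false, false_or, or_true, true_or, reduceIte,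
        false_and, if_false, List.nil_append, List.length_nil, Int.ofNat_zero,
        true_and, and_true, Nat.cast_zero, sub_zero]
      have hc : (0 : Int) < n' := by omega
      rw [if_pos hc]
      rw [pvPadSlice bp n' hn0 _ (by rw [PySem.List.slice_to _ hn0]; simp)]
      rfl
    · by_cases h3 : t = "style"
      · subst h3
        simp only [String.reduceEq, or_false, false_or, or_true, true_or, reduceIte,
          false_and, if_false, List.nil_append, List.length_nil, Int.ofNat_zero,
          true_and, and_true, Nat.cast_zero, sub_zero]
        have hc : (0 : Int) < n' := by omega
        rw [if_pos hc]
        rw [pvPadSlice bp n' hn0 _ (by rw [PySem.List.slice_to _ hn0]; simp)]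
        rfl
      · by_cases h4 : t = "all"
        · subst h4
          simp only [String.reduceEq, or_false, false_or, or_true, true_or, reduceIte,
            false_and, true_and, if_false, List.nil_append]
          have hF : PySem.List.slice (["請使用Markdown格式輸出，包含清晰的標題層級。", "請使用結構化格式，包含章節標題和項目符號。", "請使用簡潔的段落格式，避免過多的標題層級。"] : List String) none (some n')
              = List.take n'.toNat ["請使用Markdown格式輸出，包含清晰的標題層級。", "請使用結構化格式，包含章節標題和項目符號。", "請使用簡潔的段落格式，避免過多的標題層級。"] := PySem.List.slice_to _ hn0
          rw [hF]
          rw [pvStep (fun s => bp ++ "\n\n" ++ s) ["請使用Markdown格式輸出，包含清晰的標題層級。", "請使用結構化格式，包含章節標題和項目符號。", "請使用簡潔的段落格式，避免過多的標題層級。"] ["請著重記錄會議中的決策和行動項目。", "請詳細記錄討論過程和各方意見。", "請重點記錄會議結論和後續步驟。"] n' hn0]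
          rw [pvStep (fun s => bp ++ "\n\n" ++ s) (["請使用Markdown格式輸出，包含清晰的標題層級。", "請使用結構化格式，包含章節標題和項目符號。", "請使用簡潔的段落格式，避免過多的標題層級。"] ++ ["請著重記錄會議中的決策和行動項目。", "請詳細記錄討論過程和各方意見。", "請重點記錄會議結論和後續步驟。"]) ["請使用正式且專業的語言風格。", "請使用簡潔明瞭的語言風格。", "請使用親切且易於理解的語言風格。"] n' hn0]
          rw [pvPadSlice bp n' hn0 _ (by simp)]
          rw [PySem.List.slice_to _ hn0]
          simp only [List.append_assoc]
          rfl
        · simp only [h1, h2, h3, h4, or_self, false_or, or_false, false_and, if_false,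
            reduceIte, List.nil_append]
          rw [pvLookup_none t h1 h2 h3 h4]
          rw [pvPadSlice bp n' hn0 [] (by simp)]
          rw [PySem.List.slice_to _ hn0]
          simp

-- ===== VERDICT (by name: the statement is the Claim_ definition above) =====
theorem generate_prompt_variations_spec : Claim_equal_generate_prompt_variations := by
  intro base_prompt variation_type num_variations _
  exact pvMain base_prompt variation_type num_variations
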